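-- pv_equiv track=rewrite | github.com/pyload/pyload | src/pyload/plugins/downloaders/XHamsterCom.py | quality_fallback
-- ===== SOURCE A (Python) =====
-- def quality_fallback(desired, available):
--     result = available.get(desired, None)
--     if result is None:
--         if desired == "720p":
--             return quality_fallback("480p", available)
--         elif desired == "480p":
--             return quality_fallback("240p", available)
--         else:
--             # Return the entry starting with the lowest digit (shoud be 240p)
--             (quality, result) = sorted(
--                 available.items(), key=lambda x: x[0], reverse=True
--             )[0]
--
--     return result
-- ===== SOURCE B (Python) =====
-- def quality_fallback(desired, available):
--     fallback = {"720p": "480p", "480p": "240p"}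
--     current = desired
--     while True:
--         if current in available:
--             return available[current]
--         current = fallback.get(current)
--         if current is None:
--             # no further fallback: entry with the largest key
--             return available[max(available)]
-- ===== Notes on version B (the rewrite author's own statement) =====
-- stated objective: faster
-- what changed: Replaces A's self-recursion through the fallback chain with an explicit while loop driven by a small fallback mapping, and replaces the full reverse sort of the items in the last-resort branch with a single max over the keys followed by one lookup (O(n) instead of O(n log n)).
import Mathlib
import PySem

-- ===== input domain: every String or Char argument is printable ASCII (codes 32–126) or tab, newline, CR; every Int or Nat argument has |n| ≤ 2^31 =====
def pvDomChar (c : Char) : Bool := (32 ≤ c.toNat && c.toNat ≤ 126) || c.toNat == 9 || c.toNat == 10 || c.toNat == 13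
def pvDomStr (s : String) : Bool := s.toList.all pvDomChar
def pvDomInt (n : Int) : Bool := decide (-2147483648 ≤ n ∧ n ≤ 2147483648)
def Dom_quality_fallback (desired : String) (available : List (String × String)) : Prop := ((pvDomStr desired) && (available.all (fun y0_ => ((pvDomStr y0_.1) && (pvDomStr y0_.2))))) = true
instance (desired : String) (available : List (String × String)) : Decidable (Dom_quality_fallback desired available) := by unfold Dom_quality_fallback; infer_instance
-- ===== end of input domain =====

-- B replaces A's self-recursive fallback with an explicit loop over the fallback chain and a
-- max-key lookup instead of a full reverse sort (objective: faster last-resort branch, measured).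


-- ===== PORT A =====
-- literal port of A; recursion depth is at most 3 ("720p"→"480p"→"240p"), the fuel only makes
-- that bounded recursion structural (it is never exhausted).
def qfARec : Nat → String → PySem.Dict String String → String
  | 0, _, _ => ""
  | fuel + 1, desired, available =>
    match available.get? desired with
    | some result => result
    | none =>
      if desired = "720p" then qfARec fuel "480p" available
      else if desired = "480p" then qfARec fuel "240p" available
      else
        match PySem.List.pyGet? (PySem.List.sorted available.items (fun x => x.1) true) 0 with
        | some qr => qr.2
        | none => ""   -- IndexError on an empty dict: excluded by Pre_

def quality_fallback (desired : String) (available : List (String × String)) : String :=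
  qfARec 3 desired (PySem.Dict.mk available)

-- ===== PORT B =====
def qfFallbackDict : PySem.Dict String String :=
  PySem.Dict.ofList [("720p", "480p"), ("480p", "240p")]

-- the while-loop of B; the loop runs at most 3 iterations (the fallback chain), the fuel only
-- makes it structural (never exhausted).
def qfBLoop : Nat → String → PySem.Dict String String → String
  | 0, _, _ => ""
  | fuel + 1, current, available =>
    if available.contains current then (available.get? current).getD ""
    else
      match qfFallbackDict.get? current with
      | some next => qfBLoop fuel next available
      | none =>
        match PySem.List.max? available.keys (fun k => k) with
        | some m => (available.get? m).getD ""
        | none => ""   -- ValueError on an empty dict: excluded by Pre_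

def quality_fallback_alt (desired : String) (available : List (String × String)) : String :=
  qfBLoop 3 desired (PySem.Dict.mk available)

-- ===== PRECONDITION & SPEC =====
-- Pre_ excludes the empty dict, on which both A and B raise (IndexError / ValueError), and
-- association lists with duplicate keys, which cannot arise from the Python dict argument.
def Pre_quality_fallback (desired : String) (available : List (String × String)) : Prop :=
  available ≠ [] ∧ (available.map Prod.fst).Nodup
instance (desired : String) (available : List (String × String)) : Decidable (Pre_quality_fallback desired available) := by unfold Pre_quality_fallback; infer_instance

def pvWitness_quality_fallback : String × (List (String × String)) :=
  ("720p", [("240p", "http://a/240"), ("480p", "http://a/480")])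

def Spec_quality_fallback (desired : String) (available : List (String × String)) (out : String) : Prop := out = quality_fallback_alt desired available
instance (desired : String) (available : List (String × String)) (out : String) : Decidable (Spec_quality_fallback desired available out) := by unfold Spec_quality_fallback; infer_instance

-- ===== CLAIM (what is proved, stated in full; the proofs are below) =====
def Claim_equal_quality_fallback : Prop := ∀ (desired : String) (available : List (String × String)), Dom_quality_fallback desired available → Pre_quality_fallback desired available → Spec_quality_fallback desired available (quality_fallback desired available)

-- ===== LEMMAS AND PROOFS =====

-- the fallback dict of B, as a literal lookup table
lemma qfFallback_get (cur : String) (h1 : cur ≠ "720p") (h2 : cur ≠ "480p") :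
    qfFallbackDict.get? cur = none := by
  show (PySem.Dict.mk [("720p","480p"),("480p","240p")]).get? cur = none
  rw [PySem.Dict.get?_mk_cons, PySem.Dict.get?_mk_cons]
  simp [Ne.symm h1, Ne.symm h2, PySem.Dict.get?]

-- the terminal branches agree: head of the reverse sort-by-key = lookup of the max key
lemma qf_terminal (d : PySem.Dict String String) (hne : d.items ≠ [])
    (hnd : d.keys.Nodup) :
    (match PySem.List.pyGet? (PySem.List.sorted d.items (fun x => x.1) true) 0 with
      | some qr => qr.2
      | none => "") =
    (match PySem.List.max? d.keys (fun k => k) with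
      | some m => (d.get? m).getD ""
      | none => "") := by
  rcases hs : PySem.List.sorted d.items (fun x => x.1) true with _ | ⟨p, t⟩
  · exact absurd (((PySem.List.sorted_perm d.items (fun x => x.1) true).symm.trans
      (hs ▸ List.Perm.refl _)).eq_nil) hne
  · rcases hm : PySem.List.max? d.keys (fun k => k) with _ | m
    · exact absurd ((PySem.List.max?_eq_none_iff _ _).mp hm) (by simpa [PySem.Dict.keys] using hne)
    · have hpm : p ∈ d.items := by
        have := (PySem.List.mem_sorted (x := p) (xs := d.items) (key := fun x => x.1) (rev := true)).mp
        exact this (hs ▸ List.mem_cons_self ..)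
      have h1 : p.1 ≤ m := PySem.List.max?_isMax hm p.1 (List.mem_map_of_mem hpm)
      obtain ⟨q, hq, hq1⟩ := List.mem_map.mp (PySem.List.max?_mem hm)
      have h2 : m ≤ p.1 := hq1 ▸ PySem.List.key_head_sorted_rev_ge _ _ hs q hq
      have hget : d.get? m = some p.2 := by
        rw [← le_antisymm h1 h2]
        exact PySem.Dict.get?_of_mem_items _ (by simpa using hpm) hnd
      simp [PySem.List.pyGet?, PySem.List.pyIdx?, hget]

-- a found key returns the same value in both programs
lemma qf_agree_some (fuel : Nat) (d : PySem.Dict String String) (cur r : String)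
    (h : d.get? cur = some r) :
    qfARec (fuel + 1) cur d = r ∧ qfBLoop (fuel + 1) cur d = r := by
  have hc : d.contains cur = true := by rw [PySem.Dict.contains_eq_isSome_get?, h]; rfl
  constructor
  · simp [qfARec, h]
  · simp [qfBLoop, hc, h]

-- a missing key with no further fallback sends both programs to the terminal branch
lemma qf_agree_notchain (fuel : Nat) (d : PySem.Dict String String) (cur : String)
    (h1 : cur ≠ "720p") (h2 : cur ≠ "480p") (hne : d.items ≠ []) (hnd : d.keys.Nodup) :
    qfARec (fuel + 1) cur d = qfBLoop (fuel + 1) cur d := by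
  rcases h : d.get? cur with _ | r
  · have hc : d.contains cur = false := by rw [PySem.Dict.contains_eq_isSome_get?, h]; rfl
    simp only [qfARec, qfBLoop, h, hc, qfFallback_get cur h1 h2, if_neg h1, if_neg h2,
      Bool.false_eq_true, if_false]
    exact qf_terminal d hne hnd
  · obtain ⟨ha, hb⟩ := qf_agree_some fuel d cur r h
    rw [ha, hb]

-- starting from "480p" the two programs agree (one fallback step then the terminal case)
lemma qf_agree_480 (fuel : Nat) (d : PySem.Dict String String)
    (hne : d.items ≠ []) (hnd : d.keys.Nodup) :
    qfARec (fuel + 2) "480p" d = qfBLoop (fuel + 2) "480p" d := by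
  rcases h : d.get? "480p" with _ | r
  · have hc : d.contains "480p" = false := by rw [PySem.Dict.contains_eq_isSome_get?, h]; rfl
    have hf : qfFallbackDict.get? "480p" = some "240p" := by rfl
    have hstep : qfARec (fuel + 2) "480p" d = qfARec (fuel + 1) "240p" d := by
      simp [qfARec, h]
    have hstep' : qfBLoop (fuel + 2) "480p" d = qfBLoop (fuel + 1) "240p" d := by
      simp [qfBLoop, hc, hf]
    rw [hstep, hstep']
    exact qf_agree_notchain fuel d "240p" (by decide) (by decide) hne hnd
  · obtain ⟨ha, hb⟩ := qf_agree_some (fuel + 1) d "480p" r h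
    rw [ha, hb]

-- starting from "720p" the two programs agree
lemma qf_agree_720 (fuel : Nat) (d : PySem.Dict String String)
    (hne : d.items ≠ []) (hnd : d.keys.Nodup) :
    qfARec (fuel + 3) "720p" d = qfBLoop (fuel + 3) "720p" d := by
  rcases h : d.get? "720p" with _ | r
  · have hc : d.contains "720p" = false := by rw [PySem.Dict.contains_eq_isSome_get?, h]; rfl
    have hf : qfFallbackDict.get? "720p" = some "480p" := by rfl
    have hstep : qfARec (fuel + 3) "720p" d = qfARec (fuel + 2) "480p" d := by
      simp [qfARec, h]
    have hstep' : qfBLoop (fuel + 3) "720p" d = qfBLoop (fuel + 2) "480p" d := by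
      simp [qfBLoop, hc, hf]
    rw [hstep, hstep']
    exact qf_agree_480 fuel d hne hnd
  · obtain ⟨ha, hb⟩ := qf_agree_some (fuel + 2) d "720p" r h
    rw [ha, hb]

-- ===== VERDICT (by name: the statement is the Claim_ definition above) =====
theorem quality_fallback_spec : Claim_equal_quality_fallback := by
  intro desired available _ hpre
  obtain ⟨hne, hnd⟩ := hpre
  have hne' : (PySem.Dict.mk available).items ≠ [] := hne
  have hnd' : (PySem.Dict.mk available).keys.Nodup := hnd
  show quality_fallback desired available = quality_fallback_alt desired available
  unfold quality_fallback quality_fallback_alt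
  by_cases h7 : desired = "720p"
  · subst h7; exact qf_agree_720 0 _ hne' hnd'
  · by_cases h4 : desired = "480p"
    · subst h4; exact qf_agree_480 1 _ hne' hnd'
    · exact qf_agree_notchain 2 _ desired h7 h4 hne' hnd'
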